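-- pv_equiv track=rewrite | github.com/Dung-2000/base-crypto | uu.py | myuuencode
-- ===== SOURCE A (Python) =====
-- def myuuencode(plain):
--     asc_plain = ''
--     for i in range(len(plain)):
--         temp = str((bin(ord(plain[i])).split('b')[1]))
--         while len(temp) < 8:
--             temp = '0' + temp
--         asc_plain += temp
--
--     padLen = 24 - (len(asc_plain) % 24)
--     if padLen == 16:
--         #asc_plain += '00000001' * (padLen // 8)
--         asc_plain += '00000000' * (padLen // 8)
--     elif padLen == 8:
--         #asc_plain += '00000010' * (padLen // 8)
--         asc_plain += '00000000' * (padLen // 8)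
--     elif padLen == 24:
--         pass
--     else :
--         raise BaseException('Error')
--
--     res_str = ''
--     for i in range(0,len(asc_plain),6):
--         temp = ''
--         for j in range(0,6):
--             temp += asc_plain[i+j]
--         temp = chr(int(('0b' + temp), 2) + 32)
--         res_str += temp
--
--     out_str = ''
--     res_str = res_str.replace(' ','`')
--     for i in range(0,(len(res_str) // 60)):
--         out_str += 'M' + res_str[(i*60):(i+1)*60] + '\n'
--     out_str += chr((len(plain) % 45) + 32)
--     a = len(res_str) % 60
--     out_str += res_str[-a:] + '\n' + '`'
--     return (out_str)
-- ===== SOURCE B (Python) =====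
-- def myuuencode(plain):
--     res_str = ''
--     for i in range(0, len(plain), 3):
--         g = plain[i:i+3]
--         b0 = ord(g[0])
--         b1 = ord(g[1]) if len(g) > 1 else 0
--         b2 = ord(g[2]) if len(g) > 2 else 0
--         n = b0 * 65536 + b1 * 256 + b2
--         res_str += (chr((n // 262144) % 64 + 32) + chr((n // 4096) % 64 + 32)
--                     + chr((n // 64) % 64 + 32) + chr(n % 64 + 32))
--     res_str = res_str.replace(' ', '`')
--     out_str = ''
--     for i in range(len(res_str) // 60):
--         out_str += 'M' + res_str[i*60:(i+1)*60] + '\n'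
--     out_str += chr((len(plain) % 45) + 32)
--     a = len(res_str) % 60
--     out_str += res_str[-a:] + '\n' + '`'
--     return out_str
-- ===== Notes on version B (the rewrite author's own statement) =====
-- stated objective: faster
-- what changed: B drops A's intermediate per-bit binary string (eight characters per byte, re-parsed six at a time with int(temp, 2)) and instead packs each 3-byte group into a 24-bit integer, emitting the four 6-bit characters by arithmetic; the final formatting block is unchanged.
import Mathlib
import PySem

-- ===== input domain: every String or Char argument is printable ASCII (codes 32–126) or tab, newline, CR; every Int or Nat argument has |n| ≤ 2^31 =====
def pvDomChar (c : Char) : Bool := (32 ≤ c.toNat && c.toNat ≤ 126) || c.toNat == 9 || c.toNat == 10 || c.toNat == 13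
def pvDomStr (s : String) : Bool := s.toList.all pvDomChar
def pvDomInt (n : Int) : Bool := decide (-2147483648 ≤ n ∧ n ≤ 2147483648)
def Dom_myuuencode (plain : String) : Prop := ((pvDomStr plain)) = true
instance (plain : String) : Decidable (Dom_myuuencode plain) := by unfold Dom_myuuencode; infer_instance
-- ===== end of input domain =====

-- B replaces A's per-bit intermediate string with 24-bit integer arithmetic per 3-byte group;
-- the final formatting block is the same in both Pythons and is shared here as pvFmt.

-- ===== PORT A =====
-- while len(temp) < 8: temp = '0' + temp
def pvPad8 (t : List Char) : List Char :=
  if t.length < 8 then pvPad8 ('0' :: t) else t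
termination_by 8 - t.length
decreasing_by simp; omega

-- temp = bin(ord(c)).split('b')[1], zero-padded to 8 bits  (bin(n) for n ≥ 0 is PySem.Int.toBinChars)
def pvByteA (c : Char) : List Char := pvPad8 (PySem.Int.toBinChars (c.toNat : Int))

-- the padLen block: append '00000000' * (padLen // 8); the final 'else' is where A raises,
-- unreachable since asc's length is a multiple of 8 (port returns asc there)
def pvZeros8 : List Char := ['0','0','0','0','0','0','0','0']
def pvPadA (asc : List Char) : List Char :=
  if 24 - asc.length % 24 = 16 then asc ++ (List.replicate ((24 - asc.length % 24) / 8) pvZeros8).flatten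
  else if 24 - asc.length % 24 = 8 then asc ++ (List.replicate ((24 - asc.length % 24) / 8) pvZeros8).flatten
  else asc

-- temp = chr(int('0b' + temp, 2) + 32) : int(·, 2) on a '0'/'1' string is this fold
def pvParseBin (t : List Char) : Nat :=
  t.foldl (fun n c => 2 * n + (if c = '1' then 1 else 0)) 0

-- for i in range(0, len(asc_plain), 6): temp = asc_plain[i:i+6] read char by char
def pvChunk6 (l : List Char) : List Char :=
  if h : l = [] then []
  else Char.ofNat (pvParseBin (l.take 6) + 32) :: pvChunk6 (l.drop 6)
termination_by l.length
decreasing_by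
  have : 0 < l.length := List.length_pos_iff.mpr h
  simp [List.length_drop]; omega

-- the final formatting block, identical in both Pythons (replace, 'M' lines, tail):
-- res[i*60:(i+1)*60] is drop/take (non-negative in-range slice); res[-a:] is the whole
-- list when a = 0 and the last a elements otherwise (Python negative-start slice).
def pvFmt (plainLen : Nat) (res0 : List Char) : List Char :=
  let res := res0.map (fun c => if c = ' ' then '`' else c)
  let out := (List.range (res.length / 60)).foldl
      (fun o i => o ++ 'M' :: ((res.drop (i * 60)).take 60) ++ ['\n']) []
  let out := out ++ [Char.ofNat (plainLen % 45 + 32)]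
  let a := res.length % 60
  out ++ (if a = 0 then res else res.drop (res.length - a)) ++ ['\n', '`']

def myuuencode (plain : String) : String :=
  let cs := plain.toList
  let asc := cs.foldl (fun acc c => acc ++ pvByteA c) []
  String.ofList (pvFmt cs.length (pvChunk6 (pvPadA asc)))

-- ===== PORT B =====
-- one 3-byte group: n = b0*65536 + b1*256 + b2, four 6-bit chars
def pvGroup4 (b0 b1 b2 : Nat) : List Char :=
  let n := b0 * 65536 + b1 * 256 + b2
  [Char.ofNat (n / 262144 % 64 + 32), Char.ofNat (n / 4096 % 64 + 32),
   Char.ofNat (n / 64 % 64 + 32), Char.ofNat (n % 64 + 32)]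

-- for i in range(0, len(plain), 3): g = plain[i:i+3], missing trailing bytes read as 0
def pvEncB : List Char → List Char
  | [] => []
  | [c0] => pvGroup4 c0.toNat 0 0
  | [c0, c1] => pvGroup4 c0.toNat c1.toNat 0
  | c0 :: c1 :: c2 :: rest => pvGroup4 c0.toNat c1.toNat c2.toNat ++ pvEncB rest

def myuuencode_alt (plain : String) : String :=
  let cs := plain.toList
  String.ofList (pvFmt cs.length (pvEncB cs))

-- ===== PRECONDITION & SPEC =====
def Spec_myuuencode (plain : String) (out : String) : Prop := out = myuuencode_alt plain
instance (plain : String) (out : String) : Decidable (Spec_myuuencode plain out) := by unfold Spec_myuuencode; infer_instance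

-- ===== CLAIM (what is proved, stated in full; the proofs are below) =====
def Claim_equal_myuuencode : Prop := ∀ (plain : String), Dom_myuuencode plain → Spec_myuuencode plain (myuuencode plain)

-- ===== LEMMAS AND PROOFS =====

theorem pvParse_from (t : List Char) (a : Nat) :
    t.foldl (fun n c => 2 * n + (if c = '1' then 1 else 0)) a
      = a * 2 ^ t.length + pvParseBin t := by
  induction t generalizing a with
  | nil => simp [pvParseBin]
  | cons c t ih =>
    simp only [pvParseBin, List.foldl_cons] at *
    rw [ih, ih (2 * 0 + if c = '1' then 1 else 0)]
    simp only [List.length_cons, pow_succ]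
    ring

theorem pvParse_lt (t : List Char) : pvParseBin t < 2 ^ t.length := by
  induction t with
  | nil => simp [pvParseBin]
  | cons c t ih =>
    simp only [pvParseBin, List.foldl_cons] at *
    rw [pvParse_from]
    have hb : (2 * 0 + if c = '1' then 1 else 0) ≤ 1 := by split <;> omega
    have hp : (2 * 0 + if c = '1' then 1 else 0) * 2 ^ t.length ≤ 1 * 2 ^ t.length :=
      Nat.mul_le_mul_right _ hb
    simp only [List.length_cons, pow_succ]
    simp only [pvParseBin] at ih ⊢
    omega

theorem pvParse_append (x y : List Char) :
    pvParseBin (x ++ y) = pvParseBin x * 2 ^ y.length + pvParseBin y := by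
  simp only [pvParseBin, List.foldl_append]
  exact pvParse_from y _

theorem pvParse_split (t : List Char) (k : Nat) :
    pvParseBin t = pvParseBin (t.take k) * 2 ^ (t.drop k).length + pvParseBin (t.drop k) := by
  conv_lhs => rw [← List.take_append_drop k t]
  exact pvParse_append _ _

theorem pvPad8_eq (t : List Char) :
    pvPad8 t = List.replicate (8 - t.length) '0' ++ t := by
  rw [pvPad8]
  split
  next h =>
    rw [pvPad8_eq ('0' :: t)]
    have h8 : 8 - t.length = (8 - ('0' :: t).length) + 1 := by simp; omega
    rw [h8, List.replicate_succ']
    simp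
  next h =>
    have h0 : 8 - t.length = 0 := by omega
    simp [h0]
termination_by 8 - t.length
decreasing_by simp; omega

set_option maxRecDepth 8192 in
theorem pvByte_spec : ∀ v : Nat, v < 256 →
    (List.replicate (8 - (PySem.Int.toBinChars (v : Int)).length) '0'
        ++ PySem.Int.toBinChars (v : Int)).length = 8 ∧
    pvParseBin (List.replicate (8 - (PySem.Int.toBinChars (v : Int)).length) '0'
        ++ PySem.Int.toBinChars (v : Int)) = v := by
  have h : ∀ v ∈ List.range 256,
      (List.replicate (8 - (PySem.Int.toBinChars (v : Int)).length) '0'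
          ++ PySem.Int.toBinChars (v : Int)).length = 8 ∧
      pvParseBin (List.replicate (8 - (PySem.Int.toBinChars (v : Int)).length) '0'
          ++ PySem.Int.toBinChars (v : Int)) = v := by decide
  intro v hv
  exact h v (List.mem_range.mpr hv)

theorem pvByteA_len (c : Char) (h : c.toNat < 256) : (pvByteA c).length = 8 := by
  rw [pvByteA, pvPad8_eq]; exact (pvByte_spec c.toNat h).1

theorem pvByteA_parse (c : Char) (h : c.toNat < 256) : pvParseBin (pvByteA c) = c.toNat := by
  rw [pvByteA, pvPad8_eq]; exact (pvByte_spec c.toNat h).2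

theorem pvChunk6_nil : pvChunk6 [] = [] := by
  rw [pvChunk6]; rfl

theorem pvChunk6_step (x t : List Char) (hx : 6 ≤ x.length) :
    pvChunk6 (x ++ t) = Char.ofNat (pvParseBin (x.take 6) + 32) :: pvChunk6 (x.drop 6 ++ t) := by
  rw [pvChunk6]
  have hne : x ++ t ≠ [] := by
    intro h; have := congrArg List.length h
    simp only [List.length_append, List.length_nil] at this; omega
  rw [dif_neg hne, List.take_append_of_le_length (by omega), List.drop_append_of_le_length (by omega)]

theorem pvGroup_eq (L t : List Char) (n : Nat) (hL : L.length = 24) (hp : pvParseBin L = n) :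
    pvChunk6 (L ++ t) =
      [Char.ofNat (n / 262144 % 64 + 32), Char.ofNat (n / 4096 % 64 + 32),
       Char.ofNat (n / 64 % 64 + 32), Char.ofNat (n % 64 + 32)] ++ pvChunk6 t := by
  have l1 : (L.drop 6).length = 18 := by simp [hL]
  have l2 : ((L.drop 6).drop 6).length = 12 := by simp [hL]
  have l3 : (((L.drop 6).drop 6).drop 6).length = 6 := by simp [hL]
  have s1 := pvParse_split L 6
  have s2 := pvParse_split (L.drop 6) 6
  have s3 := pvParse_split ((L.drop 6).drop 6) 6
  rw [l1, hp, show (2:Nat)^18 = 262144 from by norm_num] at s1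
  rw [l2, show (2:Nat)^12 = 4096 from by norm_num] at s2
  rw [l3, show (2:Nat)^6 = 64 from by norm_num] at s3
  have b1 : pvParseBin (L.take 6) < 64 := by
    have h := pvParse_lt (L.take 6)
    have hl : (L.take 6).length = 6 := by simp [hL]
    rw [hl] at h
    exact Nat.lt_of_lt_of_le h (by norm_num)
  have b2 : pvParseBin ((L.drop 6).take 6) < 64 := by
    have h := pvParse_lt ((L.drop 6).take 6)
    have hl : ((L.drop 6).take 6).length = 6 := by simp [hL]
    rw [hl] at h
    exact Nat.lt_of_lt_of_le h (by norm_num)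
  have b3 : pvParseBin (((L.drop 6).drop 6).take 6) < 64 := by
    have h := pvParse_lt (((L.drop 6).drop 6).take 6)
    have hl : (((L.drop 6).drop 6).take 6).length = 6 := by simp [hL]
    rw [hl] at h
    exact Nat.lt_of_lt_of_le h (by norm_num)
  have b4 : pvParseBin (((L.drop 6).drop 6).drop 6) < 64 := by
    have h := pvParse_lt (((L.drop 6).drop 6).drop 6)
    rw [l3] at h
    exact Nat.lt_of_lt_of_le h (by norm_num)
  have c1 : pvParseBin (L.drop 6) < 262144 := by
    have h := pvParse_lt (L.drop 6)
    rw [l1] at h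
    exact Nat.lt_of_lt_of_le h (by norm_num)
  have c2 : pvParseBin ((L.drop 6).drop 6) < 4096 := by
    have h := pvParse_lt ((L.drop 6).drop 6)
    rw [l2] at h
    exact Nat.lt_of_lt_of_le h (by norm_num)
  have e1 : pvParseBin (L.take 6) = n / 262144 % 64 := by omega
  have e2 : pvParseBin ((L.drop 6).take 6) = n / 4096 % 64 := by omega
  have e3 : pvParseBin (((L.drop 6).drop 6).take 6) = n / 64 % 64 := by omega
  have e4 : pvParseBin (((L.drop 6).drop 6).drop 6) = n % 64 := by omega
  have t3 : (((L.drop 6).drop 6).drop 6).take 6 = ((L.drop 6).drop 6).drop 6 :=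
    List.take_of_length_le (by omega)
  have h4 : (((L.drop 6).drop 6).drop 6).drop 6 = [] :=
    List.eq_nil_of_length_eq_zero (by simp only [List.length_drop]; omega)
  rw [pvChunk6_step L t (by omega),
      pvChunk6_step (L.drop 6) t (by omega),
      pvChunk6_step ((L.drop 6).drop 6) t (by omega),
      pvChunk6_step (((L.drop 6).drop 6).drop 6) t (by omega),
      h4, t3, e1, e2, e3, e4]
  simp

theorem pvPadA_append24 (B R : List Char) (hB : B.length = 24) :
    pvPadA (B ++ R) = B ++ pvPadA R := by
  simp only [pvPadA, List.length_append, hB]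
  rw [show (24 + R.length) % 24 = R.length % 24 from by omega]
  split_ifs <;> simp [List.append_assoc]

theorem pvParse_zeros16 : pvParseBin (List.replicate 2 pvZeros8).flatten = 0 := by decide

theorem pvParse_zeros8 : pvParseBin (List.replicate 1 pvZeros8).flatten = 0 := by decide

theorem pvEnc_eq (cs : List Char) (h : ∀ c ∈ cs, c.toNat < 256) :
    pvChunk6 (pvPadA (cs.flatMap pvByteA)) = pvEncB cs := by
  induction cs using pvEncB.induct with
  | case1 => simp [pvPadA, pvEncB, pvChunk6_nil]
  | case2 c0 =>
    have h0 : c0.toNat < 256 := h c0 (by simp)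
    have hlen : (pvByteA c0).length = 8 := pvByteA_len c0 h0
    have hpad : pvPadA ([c0].flatMap pvByteA)
        = pvByteA c0 ++ (List.replicate 2 pvZeros8).flatten := by
      simp [pvPadA, hlen]
    rw [hpad]
    have hL : (pvByteA c0 ++ (List.replicate 2 pvZeros8).flatten).length = 24 := by
      simp [hlen, pvZeros8]
    have hn : pvParseBin (pvByteA c0 ++ (List.replicate 2 pvZeros8).flatten)
        = c0.toNat * 65536 := by
      rw [pvParse_append, pvByteA_parse c0 h0, pvParse_zeros16]
      simp [pvZeros8]
    have hg := pvGroup_eq _ [] _ hL hn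
    rw [List.append_nil] at hg
    rw [hg, pvChunk6_nil]
    simp [pvEncB, pvGroup4]
  | case3 c0 c1 =>
    have h0 : c0.toNat < 256 := h c0 (by simp)
    have h1 : c1.toNat < 256 := h c1 (by simp)
    have hl0 : (pvByteA c0).length = 8 := pvByteA_len c0 h0
    have hl1 : (pvByteA c1).length = 8 := pvByteA_len c1 h1
    have hpad : pvPadA ([c0, c1].flatMap pvByteA)
        = (pvByteA c0 ++ (pvByteA c1 ++ [])) ++ (List.replicate 1 pvZeros8).flatten := by
      simp [pvPadA, hl0, hl1]
    rw [hpad]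
    have hL : ((pvByteA c0 ++ (pvByteA c1 ++ [])) ++ (List.replicate 1 pvZeros8).flatten).length = 24 := by
      simp [hl0, hl1, pvZeros8]
    have hn : pvParseBin ((pvByteA c0 ++ (pvByteA c1 ++ [])) ++ (List.replicate 1 pvZeros8).flatten)
        = c0.toNat * 65536 + c1.toNat * 256 := by
      rw [pvParse_append, pvParse_append, pvByteA_parse c0 h0, pvParse_zeros8]
      simp [pvZeros8, hl1, pvByteA_parse c1 h1]
      ring
    have hg := pvGroup_eq _ [] _ hL hn
    rw [List.append_nil] at hg
    rw [hg, pvChunk6_nil]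
    simp [pvEncB, pvGroup4]
  | case4 c0 c1 c2 rest ih =>
    have h0 : c0.toNat < 256 := h c0 (by simp)
    have h1 : c1.toNat < 256 := h c1 (by simp)
    have h2 : c2.toNat < 256 := h c2 (by simp)
    have hrest : ∀ c ∈ rest, c.toNat < 256 := fun c hc => h c (by simp [hc])
    have hl0 : (pvByteA c0).length = 8 := pvByteA_len c0 h0
    have hl1 : (pvByteA c1).length = 8 := pvByteA_len c1 h1
    have hl2 : (pvByteA c2).length = 8 := pvByteA_len c2 h2
    have hflat : ((c0 :: c1 :: c2 :: rest).flatMap pvByteA)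
        = (pvByteA c0 ++ (pvByteA c1 ++ pvByteA c2)) ++ rest.flatMap pvByteA := by
      simp [List.flatMap_cons]
    have hL : (pvByteA c0 ++ (pvByteA c1 ++ pvByteA c2)).length = 24 := by
      simp [hl0, hl1, hl2]
    have hn : pvParseBin (pvByteA c0 ++ (pvByteA c1 ++ pvByteA c2))
        = c0.toNat * 65536 + c1.toNat * 256 + c2.toNat := by
      rw [pvParse_append, pvParse_append, pvByteA_parse c0 h0, pvByteA_parse c1 h1,
          pvByteA_parse c2 h2]
      simp [hl1, hl2]
      ring
    rw [hflat, pvPadA_append24 _ _ hL, pvGroup_eq _ _ _ hL hn, ih hrest]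
    simp [pvEncB, pvGroup4]

-- ===== VERDICT (by name: the statement is the Claim_ definition above) =====
theorem myuuencode_spec : Claim_equal_myuuencode := by
  intro plain hdom
  unfold Spec_myuuencode
  have hb : ∀ c ∈ plain.toList, c.toNat < 256 := by
    intro c hc
    have hall : pvDomChar c = true := by
      unfold Dom_myuuencode pvDomStr at hdom
      exact List.all_eq_true.mp hdom c hc
    unfold pvDomChar at hall
    simp at hall
    omega
  show String.ofList (pvFmt plain.toList.length
        (pvChunk6 (pvPadA (plain.toList.foldl (fun acc c => acc ++ pvByteA c) []))))
      = String.ofList (pvFmt plain.toList.length (pvEncB plain.toList))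
  rw [PySem.List.foldl_append_eq_flatMap, List.nil_append, pvEnc_eq plain.toList hb]
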